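-- pv_equiv track=rewrite | github.com/EstebanMDQ/secondbrain | src/secondbrain/handlers.py | parse_capture_message
-- ===== SOURCE A (Python) =====
-- def parse_capture_message(text: str) -> tuple[str, list[str]]:
--     """Split a capture message into (selector, notes) per the capture protocol.
--
--     The first non-empty line (after trimming leading/trailing blank lines) is
--     the selector. Remaining lines are grouped into paragraphs separated by
--     one or more blank lines; each paragraph becomes one note string with
--     internal newlines preserved.
--     """
--     lines = text.split("\n")
--
--     start = 0
--     while start < len(lines) and not lines[start].strip():
--         start += 1
--     end = len(lines)
--     while end > start and not lines[end - 1].strip():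
--         end -= 1
--     lines = lines[start:end]
--
--     if not lines:
--         return "", []
--
--     selector = lines[0].strip()
--     remainder = lines[1:]
--
--     notes: list[str] = []
--     current: list[str] = []
--     for line in remainder:
--         if line.strip():
--             current.append(line)
--         elif current:
--             notes.append("\n".join(current))
--             current = []
--     if current:
--         notes.append("\n".join(current))
--
--     return selector, notes
-- ===== SOURCE B (Python) =====
-- def parse_capture_message(text: str) -> tuple[str, list[str]]:
--     """Split a capture message into (selector, notes).
--
--     Forward two-pointer scan: skip leading blank lines, take the first line as
--     selector, then extract each maximal run of non-blank lines as one note.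
--     (Trailing blank lines need no separate trimming pass: they never start a run.)
--     """
--     def blank(line: str) -> bool:
--         return not line.strip()
--
--     lines = text.split("\n")
--     n = len(lines)
--     i = 0
--     while i < n and blank(lines[i]):
--         i += 1
--     if i == n:
--         return "", []
--     selector = lines[i].strip()
--     notes: list[str] = []
--     j = i + 1
--     while j < n:
--         if blank(lines[j]):
--             j += 1
--         else:
--             k = j
--             while k < n and not blank(lines[k]):
--                 k += 1
--             notes.append("\n".join(lines[j:k]))
--             j = k
--     return selector, notes
-- ===== Notes on version B (the rewrite author's own statement) =====
-- stated objective: alternative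
-- what changed: Replaces A's trailing-blank trimming pass plus element-wise current/flush accumulator state machine with a single forward two-pointer scan that skips blank lines and slices out each maximal non-blank run as one note (trailing blanks need no trimming since they never start a run).
import Mathlib
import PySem

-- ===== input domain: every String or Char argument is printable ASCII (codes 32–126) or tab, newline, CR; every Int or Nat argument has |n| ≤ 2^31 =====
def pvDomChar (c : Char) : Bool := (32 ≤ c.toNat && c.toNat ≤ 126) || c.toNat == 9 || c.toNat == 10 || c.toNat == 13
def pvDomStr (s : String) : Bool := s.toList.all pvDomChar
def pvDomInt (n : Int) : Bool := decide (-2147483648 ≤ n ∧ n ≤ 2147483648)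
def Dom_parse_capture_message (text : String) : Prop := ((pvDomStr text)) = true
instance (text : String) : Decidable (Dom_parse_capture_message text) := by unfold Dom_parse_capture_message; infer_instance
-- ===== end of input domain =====

-- B replaces A's trailing-trim pass and current/flush accumulator with a forward two-pointer scan
-- slicing out maximal non-blank runs (objective: alternative decomposition, same cost).

-- ===== PORT A =====
-- while start < len(lines) and not lines[start].strip(): start += 1
def aStartLoop (lines : List String) (start : Nat) : Nat :=
  if start < lines.length then
    if PySem.Str.strip (lines.getD start "") == "" then aStartLoop lines (start + 1) else start
  else start
termination_by lines.length - start
decreasing_by omega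

-- while end > start and not lines[end-1].strip(): end -= 1
def aEndLoop (lines : List String) (start e : Nat) : Nat :=
  if start < e then
    if PySem.Str.strip (lines.getD (e - 1) "") == "" then aEndLoop lines start (e - 1) else e
  else e
termination_by e
decreasing_by omega

def parse_capture_message (text : String) : String × List String :=
  let lines := (PySem.Str.split? text "\n").getD []
  let start := aStartLoop lines 0
  let e := aEndLoop lines start lines.length
  let lines2 := PySem.List.slice lines (some (start : Int)) (some (e : Int))
  if lines2 = [] then ("", [])
  else
    let selector := PySem.Str.strip (lines2.getD 0 "")
    let remainder := PySem.List.slice lines2 (some (1 : Int)) none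
    let nc := remainder.foldl
      (fun (nc : List String × List String) line =>
        if (PySem.Str.strip line == "") = false then (nc.1, nc.2 ++ [line])
        else if nc.2 ≠ [] then (nc.1 ++ [PySem.Str.join "\n" nc.2], [])
        else nc) ([], [])
    let notes := if nc.2 ≠ [] then nc.1 ++ [PySem.Str.join "\n" nc.2] else nc.1
    (selector, notes)

-- ===== PORT B =====
def bBlank (line : String) : Bool := PySem.Str.strip line == ""

-- while i < n and blank(lines[i]): i += 1
def bStartLoop (lines : List String) (i : Nat) : Nat :=
  if i < lines.length then
    if bBlank (lines.getD i "") then bStartLoop lines (i + 1) else i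
  else i
termination_by lines.length - i
decreasing_by omega

-- while k < n and not blank(lines[k]): k += 1
def bRun (lines : List String) (n k : Nat) : Nat :=
  if k < n then
    if bBlank (lines.getD k "") = false then bRun lines n (k + 1) else k
  else k
termination_by n - k
decreasing_by omega

-- needed by bScan's termination proof
theorem bRun_ge (lines : List String) (n k : Nat) : k ≤ bRun lines n k := by
  unfold bRun
  split
  · split
    · have := bRun_ge lines n (k + 1)
      omega
    · omega
  · omega
termination_by n - k
decreasing_by omega

-- while j < n: if blank skip else slice out the run lines[j:k]
def bScan (lines : List String) (n j : Nat) (notes : List String) : List String :=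
  if j < n then
    if bBlank (lines.getD j "") then bScan lines n (j + 1) notes
    else
      let k := bRun lines n j
      bScan lines n k
        (notes ++ [PySem.Str.join "\n" (PySem.List.slice lines (some (j : Int)) (some (k : Int)))])
  else notes
termination_by n - j
decreasing_by
  · omega
  · have h1 : j + 1 ≤ bRun lines n (j + 1) := bRun_ge lines n (j + 1)
    have h2 : bRun lines n j = bRun lines n (j + 1) := by
      conv_lhs => unfold bRun
      simp_all
    simp only [h2]; omega

def parse_capture_message_alt (text : String) : String × List String :=
  let lines := (PySem.Str.split? text "\n").getD []
  let i := bStartLoop lines 0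
  if i = lines.length then ("", [])
  else (PySem.Str.strip (lines.getD i ""), bScan lines lines.length (i + 1) [])

-- ===== PRECONDITION & SPEC =====
def Spec_parse_capture_message (text : String) (out : String × List String) : Prop := out = parse_capture_message_alt text
instance (text : String) (out : String × List String) : Decidable (Spec_parse_capture_message text out) := by unfold Spec_parse_capture_message; infer_instance

-- ===== CLAIM (what is proved, stated in full; the proofs are below) =====
def Claim_equal_parse_capture_message : Prop := ∀ (text : String), Dom_parse_capture_message text → Spec_parse_capture_message text (parse_capture_message text)

-- ===== LEMMAS AND PROOFS =====\n
-- proof-only helpers and lemmas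

-- non-blank predicate used in run extraction
def pvQ (l : String) : Bool := !(bBlank l)

-- trailing-blank trim (reference form of A's end-loop)
def pvRtrim (xs : List String) : List String := (xs.reverse.dropWhile bBlank).reverse

-- the fold body of port A, named
def pvF (nc : List String × List String) (line : String) : List String × List String :=
  if (PySem.Str.strip line == "") = false then (nc.1, nc.2 ++ [line])
  else if nc.2 ≠ [] then (nc.1 ++ [PySem.Str.join "\n" nc.2], [])
  else nc

def pvFin (nc : List String × List String) : List String :=
  if nc.2 ≠ [] then nc.1 ++ [PySem.Str.join "\n" nc.2] else nc.1

-- reference grouping: maximal non-blank runs, in order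
def pvNotes (xs : List String) : List String :=
  match xs with
  | [] => []
  | x :: rest =>
    if bBlank x then pvNotes rest
    else PySem.Str.join "\n" (x :: rest.takeWhile pvQ) :: pvNotes (rest.dropWhile pvQ)
termination_by xs.length
decreasing_by
  · simp
  · have := List.length_dropWhile_le pvQ rest; simp; omega

theorem pvNotes_nil : pvNotes [] = [] := by
  rw [pvNotes.eq_def]

theorem pvNotes_cons_blank (x : String) (rest : List String) (h : bBlank x = true) :
    pvNotes (x :: rest) = pvNotes rest := by
  rw [pvNotes.eq_def]
  simp [h]

theorem pvNotes_cons_nonblank (x : String) (rest : List String) (h : bBlank x = false) :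
    pvNotes (x :: rest)
      = PySem.Str.join "\n" (x :: rest.takeWhile pvQ) :: pvNotes (rest.dropWhile pvQ) := by
  rw [pvNotes.eq_def]
  simp [h]

theorem pvRtrim_nil : pvRtrim [] = [] := by simp [pvRtrim]

theorem pvRtrim_append_blank (xs : List String) (a : String) (h : bBlank a = true) :
    pvRtrim (xs ++ [a]) = pvRtrim xs := by
  simp [pvRtrim, h]

theorem pvRtrim_append_nonblank (xs : List String) (a : String) (h : bBlank a = false) :
    pvRtrim (xs ++ [a]) = xs ++ [a] := by
  simp [pvRtrim, h]

theorem pvRtrim_decomp (xs : List String) :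
    ∃ ys, xs = pvRtrim xs ++ ys ∧ ∀ y ∈ ys, bBlank y = true := by
  refine ⟨(xs.reverse.takeWhile bBlank).reverse, ?_, ?_⟩
  · rw [pvRtrim, ← List.reverse_append, List.takeWhile_append_dropWhile, List.reverse_reverse]
  · intro y hy
    exact List.mem_takeWhile_imp (by simpa using hy)

theorem pvRtrim_cons_nonblank (h : String) (r : List String) (hh : bBlank h = false) :
    pvRtrim (h :: r) = h :: pvRtrim r := by
  have hrev : (h :: r).reverse = r.reverse ++ [h] := by simp
  rw [pvRtrim, hrev, List.dropWhile_append]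
  split
  · rename_i he
    have h0 : r.reverse.dropWhile bBlank = [] := by simpa [List.isEmpty_iff] using he
    simp [hh, pvRtrim, h0]
  · simp [pvRtrim]

theorem pvRtrim_take (xs : List String) : xs.take (pvRtrim xs).length = pvRtrim xs := by
  obtain ⟨ys, hxs, _⟩ := pvRtrim_decomp xs
  set t := pvRtrim xs with ht
  rw [hxs]
  exact List.take_left

-- A's leading-trim loop equals B's
theorem aStart_eq_bStart (L : List String) (i : Nat) : aStartLoop L i = bStartLoop L i := by
  unfold aStartLoop bStartLoop bBlank
  split
  · split
    · exact aStart_eq_bStart L (i + 1)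
    · rfl
  · rfl
termination_by L.length - i
decreasing_by omega

-- characterisation of the leading-trim loop
theorem bStart_char (L : List String) (i : Nat) :
    bStartLoop L i = i + ((L.drop i).takeWhile bBlank).length := by
  by_cases hi : i < L.length
  · have hget : L.getD i "" = L[i] := List.getD_eq_getElem L "" hi
    have hdrop : L.drop i = L[i] :: L.drop (i + 1) := List.drop_eq_getElem_cons hi
    unfold bStartLoop
    rw [if_pos hi, hget, hdrop, List.takeWhile_cons]
    by_cases hb : bBlank L[i]
    · rw [if_pos hb, if_pos hb, bStart_char L (i + 1)]
      simp only [List.length_cons]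
      omega
    · rw [if_neg hb, if_neg hb]
      simp
  · have hd : L.drop i = [] := List.drop_eq_nil_of_le (by omega)
    unfold bStartLoop
    rw [if_neg hi, hd]
    simp
termination_by L.length - i
decreasing_by omega

-- characterisation of B's run-end loop
theorem bRun_char (L : List String) (n j : Nat) (hn : n = L.length) :
    bRun L n j = j + ((L.drop j).takeWhile pvQ).length := by
  subst hn
  by_cases hi : j < L.length
  · have hget : L.getD j "" = L[j] := List.getD_eq_getElem L "" hi
    have hdrop : L.drop j = L[j] :: L.drop (j + 1) := List.drop_eq_getElem_cons hi
    unfold bRun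
    rw [if_pos hi, hget, hdrop, List.takeWhile_cons]
    by_cases hb : bBlank L[j]
    · rw [if_neg (by simp [hb]), if_neg (by simp [pvQ, hb])]
      simp
    · rw [if_pos (by simp [hb]), if_pos (by simp [pvQ, hb]), bRun_char L L.length (j + 1) rfl]
      simp only [List.length_cons]
      omega
  · have hd : L.drop j = [] := List.drop_eq_nil_of_le (by omega)
    unfold bRun
    rw [if_neg hi, hd]
    simp
termination_by L.length - j
decreasing_by omega

-- characterisation of A's trailing-trim loop
theorem aEnd_char (L : List String) (s e : Nat) (hs : s ≤ e) (he : e ≤ L.length) :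
    aEndLoop L s e = s + (pvRtrim ((L.drop s).take (e - s))).length := by
  by_cases hse : s < e
  · have hlt : e - 1 < L.length := by omega
    have hget : L.getD (e - 1) "" = L[e - 1] := List.getD_eq_getElem L "" hlt
    have hsplit : (L.drop s).take (e - s) = (L.drop s).take (e - 1 - s) ++ [L[e - 1]] := by
      have h1 : e - s = (e - 1 - s) + 1 := by omega
      rw [h1, List.take_add_one]
      congr 1
      rw [List.getElem?_drop]
      have h2 : s + (e - 1 - s) = e - 1 := by omega
      rw [h2, List.getElem?_eq_getElem hlt]
      rfl
    unfold aEndLoop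
    rw [if_pos hse, hget, hsplit]
    by_cases hb : bBlank L[e - 1]
    · rw [if_pos (by simpa [bBlank] using hb), pvRtrim_append_blank _ _ hb]
      exact aEnd_char L s (e - 1) (by omega) (by omega)
    · rw [if_neg (by simpa [bBlank] using hb),
        pvRtrim_append_nonblank _ _ (by simpa using hb)]
      have hlen : ((L.drop s).take (e - 1 - s)).length = e - 1 - s := by
        rw [List.length_take, List.length_drop]
        omega
      simp only [List.length_append, hlen, List.length_cons, List.length_nil]
      omega
  · have h1 : e = s := by omega
    unfold aEndLoop
    rw [if_neg hse]
    simp [h1, pvRtrim_nil]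
termination_by e
decreasing_by omega

-- head of dropWhile fails the predicate
theorem dropWhile_head_false {α : Type} (q : α → Bool) (xs : List α) (b : α) (r : List α)
    (h : xs.dropWhile q = b :: r) : q b = false := by
  induction xs with
  | nil => simp at h
  | cons x xs ih =>
    rw [List.dropWhile_cons] at h
    split at h
    · exact ih h
    · rename_i hq
      obtain ⟨rfl, rfl⟩ : x = b ∧ xs = r := by simpa using h
      simpa using hq

-- B's scan loop computes the reference grouping
theorem bScan_char (L : List String) (j : Nat) (notes : List String) :
    bScan L L.length j notes = notes ++ pvNotes (L.drop j) := by
  by_cases hi : j < L.length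
  · have hget : L.getD j "" = L[j] := List.getD_eq_getElem L "" hi
    have hdrop : L.drop j = L[j] :: L.drop (j + 1) := List.drop_eq_getElem_cons hi
    by_cases hb : bBlank L[j]
    · unfold bScan
      rw [if_pos hi, hget, if_pos hb, bScan_char L (j + 1) notes]
      conv_rhs => rw [hdrop, pvNotes_cons_blank L[j] _ hb]
    · have hbf : bBlank L[j] = false := by simpa using hb
      set g := (L.drop (j + 1)).takeWhile pvQ with hgdef
      obtain ⟨t, ht⟩ := List.takeWhile_prefix (p := pvQ) (l := L.drop (j + 1))
      have hk : bRun L L.length j = j + 1 + g.length := by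
        unfold bRun
        rw [if_pos hi, hget, if_pos (by simp [hbf]), bRun_char L L.length (j + 1) rfl]
      have hkj : j < bRun L L.length j := by omega
      have hslice : PySem.List.slice L (some (j : Int)) (some ((bRun L L.length j : Nat) : Int))
          = L[j] :: g := by
        rw [PySem.List.slice_natCast, hk, hdrop]
        have h1 : j + 1 + g.length - j = g.length + 1 := by omega
        rw [h1, List.take_succ_cons]
        congr 1
        conv_lhs => rw [← ht]
        exact List.take_left
      have hdk : L.drop (bRun L L.length j) = t := by
        rw [hk, ← List.drop_drop]
        conv_lhs => rw [← ht]
        exact List.drop_left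
      have htd : t = (L.drop (j + 1)).dropWhile pvQ := by
        have h2 := List.takeWhile_append_dropWhile (p := pvQ) (l := L.drop (j + 1))
        exact List.append_cancel_left (ht.trans h2.symm)
      unfold bScan
      rw [if_pos hi, hget, if_neg hb]
      rw [bScan_char L (bRun L L.length j) _, hslice, hdk]
      conv_rhs => rw [hdrop, pvNotes_cons_nonblank L[j] _ hbf]
      rw [htd, hgdef]
      simp
  · have hd : L.drop j = [] := List.drop_eq_nil_of_le (by omega)
    unfold bScan
    rw [if_neg hi, hd]
    simp [pvNotes_nil]
termination_by L.length - j
decreasing_by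
  · omega
  · omega

-- non-blank run absorbed into current
theorem pvF_run (g : List String) (hg : ∀ l ∈ g, bBlank l = false) :
    ∀ (zs : List String) (n c : List String),
      (g ++ zs).foldl pvF (n, c) = zs.foldl pvF (n, c ++ g) := by
  induction g with
  | nil =>
    intro zs n c
    simp
  | cons x g ih =>
    intro zs n c
    have hx : (PySem.Str.strip x == "") = false := hg x (by simp)
    simp only [List.cons_append, List.foldl_cons]
    rw [show pvF (n, c) x = (n, c ++ [x]) from by simp [pvF, hx]]
    rw [ih (fun l hl => hg l (by simp [hl])) zs n (c ++ [x])]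
    simp

-- trailing blanks do not change the finalised fold state
theorem pvF_blanks (bs : List String) (hb : ∀ b ∈ bs, bBlank b = true) :
    ∀ nc : List String × List String, pvFin (bs.foldl pvF nc) = pvFin nc := by
  induction bs with
  | nil =>
    intro nc
    rfl
  | cons b bs ih =>
    intro nc
    have hbb : (PySem.Str.strip b == "") = true := hb b (by simp)
    simp only [List.foldl_cons]
    rw [ih (fun x hx => hb x (by simp [hx]))]
    rcases nc with ⟨n, c⟩
    rcases c with _ | ⟨c0, cs⟩
    · simp [pvF, pvFin, hbb]
    · simp [pvF, pvFin, hbb]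

-- every element of takeWhile pvQ is non-blank
theorem takeWhile_pvQ_nonblank (xs : List String) (l : String) (h : l ∈ xs.takeWhile pvQ) :
    bBlank l = false := by
  have := List.mem_takeWhile_imp h
  simpa [pvQ] using this

-- A's accumulator fold computes the reference grouping
theorem pvF_char (xs : List String) :
    ∀ n : List String, pvFin (xs.foldl pvF (n, [])) = n ++ pvNotes xs := by
  intro n
  match hxs : xs with
  | [] => simp [pvFin, pvNotes_nil]
  | x :: rest =>
    by_cases hb : bBlank x
    · have hbb : (PySem.Str.strip x == "") = true := by simpa [bBlank] using hb
      simp only [List.foldl_cons]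
      rw [show pvF (n, []) x = (n, []) from by simp [pvF, hbb]]
      rw [pvF_char rest n, pvNotes_cons_blank x rest hb]
    · have hbf : (PySem.Str.strip x == "") = false := by simpa [bBlank] using hb
      set g := rest.takeWhile pvQ with hgdef
      obtain ⟨t, ht⟩ := List.takeWhile_prefix (p := pvQ) (l := rest)
      have htd : t = rest.dropWhile pvQ := by
        have h2 := List.takeWhile_append_dropWhile (p := pvQ) (l := rest)
        exact List.append_cancel_left (ht.trans h2.symm)
      have hgnb : ∀ l ∈ g, bBlank l = false := fun l hl => takeWhile_pvQ_nonblank rest l hl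
      simp only [List.foldl_cons]
      rw [show pvF (n, []) x = (n, [x]) from by simp [pvF, hbf]]
      conv_lhs => rw [← ht]
      rw [pvF_run g hgnb t n [x]]
      have hstep : pvFin (t.foldl pvF (n, [x] ++ g)) = n ++ PySem.Str.join "\n" (x :: g) :: pvNotes t := by
        rcases t with _ | ⟨b, t'⟩
        · simp [pvFin, pvNotes_nil]
        · have hbb : (PySem.Str.strip b == "") = true := by
            have := dropWhile_head_false pvQ rest b t' htd.symm
            simpa [pvQ, bBlank] using this
          simp only [List.foldl_cons]
          rw [show pvF (n, [x] ++ g) b = (n ++ [PySem.Str.join "\n" (x :: g)], []) from by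
            simp [pvF, hbb]]
          rw [pvF_char t' (n ++ [PySem.Str.join "\n" (x :: g)])]
          rw [pvNotes_cons_blank b t' (by simpa [bBlank] using hbb)]
          simp
      rw [hstep, pvNotes_cons_nonblank x rest (by simpa [bBlank] using hbf), ← htd]
termination_by xs.length
decreasing_by
  · simp
  · simp
    have h1 : g.length + (b :: t').length = rest.length := by
      rw [← List.length_append, ht]
    simp at h1
    omega

-- ===== VERDICT (by name: the statement is the Claim_ definition above) =====
theorem parse_capture_message_spec : Claim_equal_parse_capture_message := by
  intro text _
  unfold Spec_parse_capture_message parse_capture_message parse_capture_message_alt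
  simp only []
  set L := (PySem.Str.split? text "\n").getD [] with hLdef
  have hlam : (fun (nc : List String × List String) (line : String) =>
      if (PySem.Str.strip line == "") = false then (nc.1, nc.2 ++ [line])
      else if nc.2 ≠ [] then (nc.1 ++ [PySem.Str.join "\n" nc.2], [])
      else nc) = pvF := rfl
  set T := L.dropWhile bBlank with hTdef
  set s := (L.takeWhile bBlank).length with hsdef
  have hs : aStartLoop L 0 = s := by
    rw [aStart_eq_bStart, bStart_char]
    simp [hsdef]
  have hbs : bStartLoop L 0 = s := by
    rw [bStart_char]
    simp [hsdef]
  have hsplitL : L.takeWhile bBlank ++ T = L := List.takeWhile_append_dropWhile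
  have hdropS : L.drop s = T := by
    conv_lhs => rw [← hsplitL]
    exact List.drop_left
  have hslen : s ≤ L.length := by
    rw [hsdef]
    exact (List.takeWhile_prefix bBlank).length_le
  have hTlen : T.length = L.length - s := by
    rw [← hdropS, List.length_drop]
  have he : aEndLoop L s L.length = s + (pvRtrim T).length := by
    rw [aEnd_char L s L.length hslen le_rfl, hdropS, ← hTlen, List.take_length]
  have hl2 : PySem.List.slice L (some ((s : Nat) : Int))
      (some ((aEndLoop L s L.length : Nat) : Int)) = pvRtrim T := by
    rw [PySem.List.slice_natCast, he, hdropS]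
    rw [show s + (pvRtrim T).length - s = (pvRtrim T).length from by omega]
    exact pvRtrim_take T
  rw [hs, hbs, hl2, hlam]
  rcases hTc : T with _ | ⟨h0, r⟩
  · -- no content: both return ("", [])
    have hsl : s = L.length := by
      have := hTlen
      rw [hTc] at this
      simp at this
      omega
    rw [if_pos pvRtrim_nil, if_pos hsl]
  · -- selector h0, remaining lines r
    have hh0 : bBlank h0 = false := dropWhile_head_false bBlank L h0 r (hTdef ▸ hTc)
    have hrt : pvRtrim (h0 :: r) = h0 :: pvRtrim r := pvRtrim_cons_nonblank h0 r hh0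
    have hslt : s < L.length := by
      by_contra hc
      have : L.drop s = [] := List.drop_eq_nil_of_le (by omega)
      rw [hdropS, hTc] at this
      simp at this
    have hconsS : L.drop s = L[s] :: L.drop (s + 1) := List.drop_eq_getElem_cons hslt
    have hLs : L[s] = h0 ∧ L.drop (s + 1) = r := by
      have := hconsS.symm.trans (hdropS.trans hTc)
      exact ⟨by injection this, by injection this⟩
    rw [if_neg (by rw [hrt]; simp), if_neg (show ¬ s = L.length from by omega)]
    have hAnotes : pvFin (List.foldl pvF ([], []) (pvRtrim r)) = pvNotes r := by
      obtain ⟨ys, hys, hbys⟩ := pvRtrim_decomp r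
      calc pvFin (List.foldl pvF ([], []) (pvRtrim r))
          = pvFin (List.foldl pvF (List.foldl pvF ([], []) (pvRtrim r)) ys) :=
            (pvF_blanks ys hbys _).symm
        _ = pvFin (List.foldl pvF ([], []) (pvRtrim r ++ ys)) := by rw [List.foldl_append]
        _ = pvFin (List.foldl pvF ([], []) r) := by rw [← hys]
        _ = [] ++ pvNotes r := pvF_char r []
        _ = pvNotes r := by simp
    have hBnotes : bScan L L.length (s + 1) [] = pvNotes r := by
      rw [bScan_char L (s + 1) [], hLs.2]
      simp
    rw [hrt, PySem.List.slice_from_one]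
    simp only [List.getD_cons_zero, List.tail_cons]
    rw [hBnotes, List.getD_eq_getElem L "" hslt, hLs.1]
    have : (if (List.foldl pvF ([], []) (pvRtrim r)).2 ≠ [] then
        (List.foldl pvF ([], []) (pvRtrim r)).1 ++
          [PySem.Str.join "\n" (List.foldl pvF ([], []) (pvRtrim r)).2]
      else (List.foldl pvF ([], []) (pvRtrim r)).1) = pvNotes r := hAnotes
    rw [this]
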